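-- pv_equiv track=rewrite | github.com/Amit17491/Leet_code_problem | string/largest_three_digit_in_string.py | largestGoodInteger
-- ===== SOURCE A (Python) =====
-- def largestGoodInteger(num: str) -> str:
--     nums= []
--     for i in range(9,-1,-1):
--         x = str(i)*3
--         if x in num:
--             return x
--         else:
--             nums.append("")
--     x = "".join(nums)
--     return x
--
-- num = "6777133339"
-- ===== SOURCE B (Python) =====
-- def largestGoodInteger(num: str) -> str:
--     best = -1
--     for a, b, c in zip(num, num[1:], num[2:]):
--         if a == b == c and '0' <= a <= '9':
--             d = ord(a) - ord('0')
--             if d > best: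
--                 best = d
--     return str(best) * 3 if best >= 0 else ""
-- ===== Notes on version B (the rewrite author's own statement) =====
-- stated objective: alternative
-- what changed: A scans digits 9 down to 0 and does a fresh substring search of the whole string for each triple; B makes one sliding-window pass over the string (zip of consecutive triples), keeping the maximum digit whose window is three equal digit characters.
import Mathlib
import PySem

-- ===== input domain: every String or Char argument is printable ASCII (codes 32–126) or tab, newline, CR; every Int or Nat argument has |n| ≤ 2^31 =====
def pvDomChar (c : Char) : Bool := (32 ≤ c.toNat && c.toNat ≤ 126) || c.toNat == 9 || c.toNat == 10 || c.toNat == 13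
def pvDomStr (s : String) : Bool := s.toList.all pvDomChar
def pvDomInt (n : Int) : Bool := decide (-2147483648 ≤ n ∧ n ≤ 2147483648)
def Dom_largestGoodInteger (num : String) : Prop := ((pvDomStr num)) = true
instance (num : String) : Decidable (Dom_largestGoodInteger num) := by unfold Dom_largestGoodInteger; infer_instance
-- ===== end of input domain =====

-- B replaces A's ten whole-string substring searches (digits 9..0) by one sliding-window pass
-- over consecutive character triples, keeping the maximum qualifying digit; same return value.

-- ===== PORT A =====
-- the 'for i in range(9,-1,-1)' loop with its early 'return x'; nums collects the "" appends
def aLoop (num : String) (nums : List String) : List Int → String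
  | [] => PySem.Str.join "" nums            -- x = "".join(nums); return x
  | i :: rest =>
      let x := PySem.Int.toStr i ++ PySem.Int.toStr i ++ PySem.Int.toStr i   -- x = str(i)*3
      if PySem.Str.isIn x num then x        -- if x in num: return x
      else aLoop num (nums ++ [""]) rest    -- else: nums.append("")

def largestGoodInteger (num : String) : String :=
  aLoop num [] (PySem.List.pyRange 9 (-1) (-1))

-- ===== PORT B =====
-- loop body: 'if a == b == c and '0' <= a <= '9': d = ord(a)-ord('0'); if d > best: best = d'
-- ('0' <= a <= '9' compares code points, exactly Char.toNat bounds)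
def bStep (best : Int) (w : Char × Char × Char) : Int :=
  if w.1 = w.2.1 ∧ w.2.1 = w.2.2 ∧ 48 ≤ w.1.toNat ∧ w.1.toNat ≤ 57 then
    (if ((w.1.toNat : Int) - 48) > best then ((w.1.toNat : Int) - 48) else best)
  else best

def largestGoodInteger_alt (num : String) : String :=
  let l := num.toList
  -- zip(num, num[1:], num[2:])
  let ws := l.zip ((PySem.List.slice l (some 1) none).zip (PySem.List.slice l (some 2) none))
  let best := ws.foldl bStep (-1)
  if 0 ≤ best then PySem.Int.toStr best ++ PySem.Int.toStr best ++ PySem.Int.toStr best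
  else ""

-- ===== PRECONDITION & SPEC =====
def Spec_largestGoodInteger (num : String) (out : String) : Prop := out = largestGoodInteger_alt num
instance (num : String) (out : String) : Decidable (Spec_largestGoodInteger num out) := by unfold Spec_largestGoodInteger; infer_instance

-- ===== CLAIM (what is proved, stated in full; the proofs are below) =====
def Claim_equal_largestGoodInteger : Prop := ∀ (num : String), Dom_largestGoodInteger num → Spec_largestGoodInteger num (largestGoodInteger num)

-- ===== LEMMAS AND PROOFS =====

-- 'l contains three equal consecutive characters c' (reference predicate for both sides)
def hasT (c : Char) : List Char → Bool
  | a :: b :: d :: t => (a == c && b == c && d == c) || hasT c (b :: d :: t)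
  | _ => false

-- the list of consecutive triples (what zip(num, num[1:], num[2:]) produces)
def wins : List Char → List (Char × Char × Char)
  | a :: b :: d :: t => (a, b, d) :: wins (b :: d :: t)
  | _ => []

theorem wins_eq_zip (l : List Char) :
    l.zip ((l.drop 1).zip (l.drop 2)) = wins l := by
  induction l using wins.induct with
  | case1 a b d t ih => simpa [wins] using ih
  | case2 l h =>
      rcases l with _ | ⟨a, _ | ⟨b, _ | ⟨d, t⟩⟩⟩
      · simp [wins]
      · simp [wins]
      · simp [wins]
      · exact (h a b d t rfl).elim

theorem hasT_iff_infix (c : Char) (l : List Char) :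
    hasT c l = true ↔ [c, c, c] <:+: l := by
  induction l using hasT.induct with
  | case1 a b d t ih =>
      rw [List.infix_cons_iff]
      simp [hasT, ih, List.cons_prefix_cons]
      tauto
  | case2 l h =>
      rcases l with _ | ⟨a, _ | ⟨b, _ | ⟨d, t⟩⟩⟩
      · simp [hasT]
      · simp [hasT]
        intro hinf; have := hinf.length_le; simp at this
      · simp [hasT]
        intro hinf; have := hinf.length_le; simp at this
      · exact (h a b d t rfl).elim

theorem hasT_iff_win (c : Char) (l : List Char) :
    hasT c l = true ↔ (c, c, c) ∈ wins l := by
  induction l using hasT.induct with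
  | case1 a b d t ih =>
      simp [hasT, wins, ih, Prod.ext_iff]
      tauto
  | case2 l h =>
      rcases l with _ | ⟨a, _ | ⟨b, _ | ⟨d, t⟩⟩⟩
      · simp [hasT, wins]
      · simp [hasT, wins]
      · simp [hasT, wins]
      · exact (h a b d t rfl).elim

theorem bfold_ge (ws : List (Char × Char × Char)) (acc : Int) :
    acc ≤ ws.foldl bStep acc := by
  induction ws generalizing acc with
  | nil => simp
  | cons w t ih =>
      refine le_trans ?_ (ih (bStep acc w))
      unfold bStep; split_ifs <;> omega

theorem bfold_mem (ws : List (Char × Char × Char)) (acc : Int) (w : Char × Char × Char)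
    (hm : w ∈ ws)
    (hq : w.1 = w.2.1 ∧ w.2.1 = w.2.2 ∧ 48 ≤ w.1.toNat ∧ w.1.toNat ≤ 57) :
    ((w.1.toNat : Int) - 48) ≤ ws.foldl bStep acc := by
  induction ws generalizing acc with
  | nil => cases hm
  | cons x t ih =>
      rcases List.mem_cons.mp hm with h | h
      · subst h
        refine le_trans ?_ (bfold_ge t (bStep acc w))
        unfold bStep; rw [if_pos hq]; split_ifs <;> omega
      · exact ih (bStep acc x) h

theorem bfold_le (ws : List (Char × Char × Char)) (acc m : Int)
    (h : ∀ w ∈ ws, (w.1 = w.2.1 ∧ w.2.1 = w.2.2 ∧ 48 ≤ w.1.toNat ∧ w.1.toNat ≤ 57) →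
          ((w.1.toNat : Int) - 48) ≤ m)
    (ha : acc ≤ m) : ws.foldl bStep acc ≤ m := by
  induction ws generalizing acc with
  | nil => simpa
  | cons w t ih =>
      refine ih (bStep acc w) (fun x hx => h x (List.mem_cons_of_mem _ hx)) ?_
      have := h w (List.mem_cons_self ..)
      unfold bStep; split_ifs with h1 h2
      · exact le_trans (by omega) (this h1)
      · exact ha
      · exact ha

theorem char_ofNat_toNat_digit (d : Nat) (hd : d ≤ 9) :
    (Char.ofNat (48 + d)).toNat = 48 + d := by
  interval_cases d <;> decide

theorem best_eq (l : List Char) (d : Nat) (hd : d ≤ 9)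
    (ht : hasT (Char.ofNat (48 + d)) l = true)
    (hup : ∀ k, d < k → k ≤ 9 → hasT (Char.ofNat (48 + k)) l = false) :
    (wins l).foldl bStep (-1) = (d : Int) := by
  have hmem := (hasT_iff_win _ l).mp ht
  have hv := char_ofNat_toNat_digit d hd
  apply le_antisymm
  · apply bfold_le
    · intro w hw hq
      obtain ⟨h1, h2, h3, h4⟩ := hq
      set c0 := w.1 with hc0
      have hweq : w = (c0, c0, c0) := by
        obtain ⟨wa, wb, wc⟩ := w; simp_all
      have hT : hasT c0 l = true := by
        rw [hasT_iff_win]; rwa [hweq] at hw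
      set k := c0.toNat - 48 with hk
      have hc0eq : c0 = Char.ofNat (48 + k) := by
        have : 48 + k = c0.toNat := by omega
        rw [this, Char.ofNat_toNat]
      by_cases hkd : k ≤ d
      · push_cast
        omega
      · exfalso
        have hk9 : k ≤ 9 := by omega
        have := hup k (by omega) hk9
        rw [hc0eq] at hT
        rw [this] at hT; exact Bool.false_ne_true hT
    · omega
  · have h2 := bfold_mem (wins l) (-1) (Char.ofNat (48+d), Char.ofNat (48+d), Char.ofNat (48+d))
      hmem (by refine ⟨rfl, rfl, ?_, ?_⟩ <;> rw [hv] <;> omega)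
    simp only [hv] at h2
    omega

theorem best_none (l : List Char)
    (h : ∀ k, k ≤ 9 → hasT (Char.ofNat (48 + k)) l = false) :
    (wins l).foldl bStep (-1) = -1 := by
  apply le_antisymm
  · apply bfold_le
    · intro w hw hq
      exfalso
      obtain ⟨h1, h2, h3, h4⟩ := hq
      have hweq : w = (w.1, w.1, w.1) := by
        obtain ⟨wa, wb, wc⟩ := w; simp_all
      have hT : hasT w.1 l = true := by
        rw [hasT_iff_win]; rwa [hweq] at hw
      set k := w.1.toNat - 48 with hk
      have hc0eq : w.1 = Char.ofNat (48 + k) := by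
        have : 48 + k = w.1.toNat := by omega
        rw [this, Char.ofNat_toNat]
      have := h k (by omega)
      rw [hc0eq, this] at hT; exact Bool.false_ne_true hT
    · omega
  · exact bfold_ge _ _

-- B unfolded to the wins fold
theorem alt_eq_fold (num : String) :
    largestGoodInteger_alt num =
      (if 0 ≤ (wins num.toList).foldl bStep (-1) then
        PySem.Int.toStr ((wins num.toList).foldl bStep (-1)) ++
        PySem.Int.toStr ((wins num.toList).foldl bStep (-1)) ++
        PySem.Int.toStr ((wins num.toList).foldl bStep (-1))
      else "") := by
  simp only [largestGoodInteger_alt]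
  rw [PySem.List.slice_from num.toList (by norm_num : (0:Int) ≤ 1),
      PySem.List.slice_from num.toList (by norm_num : (0:Int) ≤ 2)]
  rw [show ((1:Int).toNat) = 1 from rfl, show ((2:Int).toNat) = 2 from rfl, wins_eq_zip]

theorem trip0 (num : String) :
    PySem.Str.isIn (PySem.Int.toStr 0 ++ PySem.Int.toStr 0 ++ PySem.Int.toStr 0) num
      = hasT '0' num.toList := by
  rw [Bool.eq_iff_iff, PySem.Str.isIn_iff_infix, hasT_iff_infix,
      show (PySem.Int.toStr 0 ++ PySem.Int.toStr 0 ++ PySem.Int.toStr 0).toList = ['0', '0', '0'] from by decide]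

theorem trip1 (num : String) :
    PySem.Str.isIn (PySem.Int.toStr 1 ++ PySem.Int.toStr 1 ++ PySem.Int.toStr 1) num
      = hasT '1' num.toList := by
  rw [Bool.eq_iff_iff, PySem.Str.isIn_iff_infix, hasT_iff_infix,
      show (PySem.Int.toStr 1 ++ PySem.Int.toStr 1 ++ PySem.Int.toStr 1).toList = ['1', '1', '1'] from by decide]

theorem trip2 (num : String) :
    PySem.Str.isIn (PySem.Int.toStr 2 ++ PySem.Int.toStr 2 ++ PySem.Int.toStr 2) num
      = hasT '2' num.toList := by
  rw [Bool.eq_iff_iff, PySem.Str.isIn_iff_infix, hasT_iff_infix,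
      show (PySem.Int.toStr 2 ++ PySem.Int.toStr 2 ++ PySem.Int.toStr 2).toList = ['2', '2', '2'] from by decide]

theorem trip3 (num : String) :
    PySem.Str.isIn (PySem.Int.toStr 3 ++ PySem.Int.toStr 3 ++ PySem.Int.toStr 3) num
      = hasT '3' num.toList := by
  rw [Bool.eq_iff_iff, PySem.Str.isIn_iff_infix, hasT_iff_infix,
      show (PySem.Int.toStr 3 ++ PySem.Int.toStr 3 ++ PySem.Int.toStr 3).toList = ['3', '3', '3'] from by decide]

theorem trip4 (num : String) :
    PySem.Str.isIn (PySem.Int.toStr 4 ++ PySem.Int.toStr 4 ++ PySem.Int.toStr 4) num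
      = hasT '4' num.toList := by
  rw [Bool.eq_iff_iff, PySem.Str.isIn_iff_infix, hasT_iff_infix,
      show (PySem.Int.toStr 4 ++ PySem.Int.toStr 4 ++ PySem.Int.toStr 4).toList = ['4', '4', '4'] from by decide]

theorem trip5 (num : String) :
    PySem.Str.isIn (PySem.Int.toStr 5 ++ PySem.Int.toStr 5 ++ PySem.Int.toStr 5) num
      = hasT '5' num.toList := by
  rw [Bool.eq_iff_iff, PySem.Str.isIn_iff_infix, hasT_iff_infix,
      show (PySem.Int.toStr 5 ++ PySem.Int.toStr 5 ++ PySem.Int.toStr 5).toList = ['5', '5', '5'] from by decide]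

theorem trip6 (num : String) :
    PySem.Str.isIn (PySem.Int.toStr 6 ++ PySem.Int.toStr 6 ++ PySem.Int.toStr 6) num
      = hasT '6' num.toList := by
  rw [Bool.eq_iff_iff, PySem.Str.isIn_iff_infix, hasT_iff_infix,
      show (PySem.Int.toStr 6 ++ PySem.Int.toStr 6 ++ PySem.Int.toStr 6).toList = ['6', '6', '6'] from by decide]

theorem trip7 (num : String) :
    PySem.Str.isIn (PySem.Int.toStr 7 ++ PySem.Int.toStr 7 ++ PySem.Int.toStr 7) num
      = hasT '7' num.toList := by
  rw [Bool.eq_iff_iff, PySem.Str.isIn_iff_infix, hasT_iff_infix,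
      show (PySem.Int.toStr 7 ++ PySem.Int.toStr 7 ++ PySem.Int.toStr 7).toList = ['7', '7', '7'] from by decide]

theorem trip8 (num : String) :
    PySem.Str.isIn (PySem.Int.toStr 8 ++ PySem.Int.toStr 8 ++ PySem.Int.toStr 8) num
      = hasT '8' num.toList := by
  rw [Bool.eq_iff_iff, PySem.Str.isIn_iff_infix, hasT_iff_infix,
      show (PySem.Int.toStr 8 ++ PySem.Int.toStr 8 ++ PySem.Int.toStr 8).toList = ['8', '8', '8'] from by decide]

theorem trip9 (num : String) :
    PySem.Str.isIn (PySem.Int.toStr 9 ++ PySem.Int.toStr 9 ++ PySem.Int.toStr 9) num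
      = hasT '9' num.toList := by
  rw [Bool.eq_iff_iff, PySem.Str.isIn_iff_infix, hasT_iff_infix,
      show (PySem.Int.toStr 9 ++ PySem.Int.toStr 9 ++ PySem.Int.toStr 9).toList = ['9', '9', '9'] from by decide]

-- B's value at a found digit
theorem alt_found (num : String) (d : Nat) (hd : d ≤ 9)
    (ht : hasT (Char.ofNat (48 + d)) num.toList = true)
    (hup : ∀ k, d < k → k ≤ 9 → hasT (Char.ofNat (48 + k)) num.toList = false) :
    largestGoodInteger_alt num =
      PySem.Int.toStr (d : Int) ++ PySem.Int.toStr (d : Int) ++ PySem.Int.toStr (d : Int) := by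
  rw [alt_eq_fold, best_eq num.toList d hd ht hup]
  simp

theorem alt_none (num : String)
    (h : ∀ k, k ≤ 9 → hasT (Char.ofNat (48 + k)) num.toList = false) :
    largestGoodInteger_alt num = "" := by
  rw [alt_eq_fold, best_none num.toList h]
  simp

-- ===== VERDICT (by name: the statement is the Claim_ definition above) =====
theorem largestGoodInteger_spec : Claim_equal_largestGoodInteger := by
  intro num _
  unfold Spec_largestGoodInteger largestGoodInteger
  rw [show PySem.List.pyRange 9 (-1) (-1) = [9, 8, 7, 6, 5, 4, 3, 2, 1, 0] from by decide]
  simp only [aLoop, trip9 num, trip8 num, trip7 num, trip6 num, trip5 num, trip4 num,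
    trip3 num, trip2 num, trip1 num, trip0 num]
  by_cases h9 : hasT '9' num.toList = true
  · rw [if_pos h9]
    have hup : ∀ k, 9 < k → k ≤ 9 → hasT (Char.ofNat (48 + k)) num.toList = false := by
      intro k hk1 hk2
      interval_cases k <;> omega
    rw [alt_found num 9 (by norm_num)
        (by rw [show Char.ofNat (48 + 9) = '9' from by decide]; exact h9) hup]
    norm_num
  · rw [if_neg h9]
    by_cases h8 : hasT '8' num.toList = true
    · rw [if_pos h8]
      have hup : ∀ k, 8 < k → k ≤ 9 → hasT (Char.ofNat (48 + k)) num.toList = false := by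
        intro k hk1 hk2
        interval_cases k <;> first
          | omega
          | (rw [show Char.ofNat (48 + 9) = '9' from by decide]; simpa using h9)
      rw [alt_found num 8 (by norm_num)
          (by rw [show Char.ofNat (48 + 8) = '8' from by decide]; exact h8) hup]
      norm_num
    · rw [if_neg h8]
      by_cases h7 : hasT '7' num.toList = true
      · rw [if_pos h7]
        have hup : ∀ k, 7 < k → k ≤ 9 → hasT (Char.ofNat (48 + k)) num.toList = false := by
          intro k hk1 hk2
          interval_cases k <;> first
            | omega
            | (rw [show Char.ofNat (48 + 8) = '8' from by decide]; simpa using h8)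
            | (rw [show Char.ofNat (48 + 9) = '9' from by decide]; simpa using h9)
        rw [alt_found num 7 (by norm_num)
            (by rw [show Char.ofNat (48 + 7) = '7' from by decide]; exact h7) hup]
        norm_num
      · rw [if_neg h7]
        by_cases h6 : hasT '6' num.toList = true
        · rw [if_pos h6]
          have hup : ∀ k, 6 < k → k ≤ 9 → hasT (Char.ofNat (48 + k)) num.toList = false := by
            intro k hk1 hk2
            interval_cases k <;> first
              | omega
              | (rw [show Char.ofNat (48 + 7) = '7' from by decide]; simpa using h7)
              | (rw [show Char.ofNat (48 + 8) = '8' from by decide]; simpa using h8)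
              | (rw [show Char.ofNat (48 + 9) = '9' from by decide]; simpa using h9)
          rw [alt_found num 6 (by norm_num)
              (by rw [show Char.ofNat (48 + 6) = '6' from by decide]; exact h6) hup]
          norm_num
        · rw [if_neg h6]
          by_cases h5 : hasT '5' num.toList = true
          · rw [if_pos h5]
            have hup : ∀ k, 5 < k → k ≤ 9 → hasT (Char.ofNat (48 + k)) num.toList = false := by
              intro k hk1 hk2
              interval_cases k <;> first
                | omega
                | (rw [show Char.ofNat (48 + 6) = '6' from by decide]; simpa using h6)
                | (rw [show Char.ofNat (48 + 7) = '7' from by decide]; simpa using h7)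
                | (rw [show Char.ofNat (48 + 8) = '8' from by decide]; simpa using h8)
                | (rw [show Char.ofNat (48 + 9) = '9' from by decide]; simpa using h9)
            rw [alt_found num 5 (by norm_num)
                (by rw [show Char.ofNat (48 + 5) = '5' from by decide]; exact h5) hup]
            norm_num
          · rw [if_neg h5]
            by_cases h4 : hasT '4' num.toList = true
            · rw [if_pos h4]
              have hup : ∀ k, 4 < k → k ≤ 9 → hasT (Char.ofNat (48 + k)) num.toList = false := by
                intro k hk1 hk2
                interval_cases k <;> first
                  | omega
                  | (rw [show Char.ofNat (48 + 5) = '5' from by decide]; simpa using h5)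
                  | (rw [show Char.ofNat (48 + 6) = '6' from by decide]; simpa using h6)
                  | (rw [show Char.ofNat (48 + 7) = '7' from by decide]; simpa using h7)
                  | (rw [show Char.ofNat (48 + 8) = '8' from by decide]; simpa using h8)
                  | (rw [show Char.ofNat (48 + 9) = '9' from by decide]; simpa using h9)
              rw [alt_found num 4 (by norm_num)
                  (by rw [show Char.ofNat (48 + 4) = '4' from by decide]; exact h4) hup]
              norm_num
            · rw [if_neg h4]
              by_cases h3 : hasT '3' num.toList = true
              · rw [if_pos h3]
                have hup : ∀ k, 3 < k → k ≤ 9 → hasT (Char.ofNat (48 + k)) num.toList = false := by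
                  intro k hk1 hk2
                  interval_cases k <;> first
                    | omega
                    | (rw [show Char.ofNat (48 + 4) = '4' from by decide]; simpa using h4)
                    | (rw [show Char.ofNat (48 + 5) = '5' from by decide]; simpa using h5)
                    | (rw [show Char.ofNat (48 + 6) = '6' from by decide]; simpa using h6)
                    | (rw [show Char.ofNat (48 + 7) = '7' from by decide]; simpa using h7)
                    | (rw [show Char.ofNat (48 + 8) = '8' from by decide]; simpa using h8)
                    | (rw [show Char.ofNat (48 + 9) = '9' from by decide]; simpa using h9)
                rw [alt_found num 3 (by norm_num)
                    (by rw [show Char.ofNat (48 + 3) = '3' from by decide]; exact h3) hup]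
                norm_num
              · rw [if_neg h3]
                by_cases h2 : hasT '2' num.toList = true
                · rw [if_pos h2]
                  have hup : ∀ k, 2 < k → k ≤ 9 → hasT (Char.ofNat (48 + k)) num.toList = false := by
                    intro k hk1 hk2
                    interval_cases k <;> first
                      | omega
                      | (rw [show Char.ofNat (48 + 3) = '3' from by decide]; simpa using h3)
                      | (rw [show Char.ofNat (48 + 4) = '4' from by decide]; simpa using h4)
                      | (rw [show Char.ofNat (48 + 5) = '5' from by decide]; simpa using h5)
                      | (rw [show Char.ofNat (48 + 6) = '6' from by decide]; simpa using h6)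
                      | (rw [show Char.ofNat (48 + 7) = '7' from by decide]; simpa using h7)
                      | (rw [show Char.ofNat (48 + 8) = '8' from by decide]; simpa using h8)
                      | (rw [show Char.ofNat (48 + 9) = '9' from by decide]; simpa using h9)
                  rw [alt_found num 2 (by norm_num)
                      (by rw [show Char.ofNat (48 + 2) = '2' from by decide]; exact h2) hup]
                  norm_num
                · rw [if_neg h2]
                  by_cases h1 : hasT '1' num.toList = true
                  · rw [if_pos h1]
                    have hup : ∀ k, 1 < k → k ≤ 9 → hasT (Char.ofNat (48 + k)) num.toList = false := by
                      intro k hk1 hk2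
                      interval_cases k <;> first
                        | omega
                        | (rw [show Char.ofNat (48 + 2) = '2' from by decide]; simpa using h2)
                        | (rw [show Char.ofNat (48 + 3) = '3' from by decide]; simpa using h3)
                        | (rw [show Char.ofNat (48 + 4) = '4' from by decide]; simpa using h4)
                        | (rw [show Char.ofNat (48 + 5) = '5' from by decide]; simpa using h5)
                        | (rw [show Char.ofNat (48 + 6) = '6' from by decide]; simpa using h6)
                        | (rw [show Char.ofNat (48 + 7) = '7' from by decide]; simpa using h7)
                        | (rw [show Char.ofNat (48 + 8) = '8' from by decide]; simpa using h8)
                        | (rw [show Char.ofNat (48 + 9) = '9' from by decide]; simpa using h9)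
                    rw [alt_found num 1 (by norm_num)
                        (by rw [show Char.ofNat (48 + 1) = '1' from by decide]; exact h1) hup]
                    norm_num
                  · rw [if_neg h1]
                    by_cases h0 : hasT '0' num.toList = true
                    · rw [if_pos h0]
                      have hup : ∀ k, 0 < k → k ≤ 9 → hasT (Char.ofNat (48 + k)) num.toList = false := by
                        intro k hk1 hk2
                        interval_cases k <;> first
                          | omega
                          | (rw [show Char.ofNat (48 + 1) = '1' from by decide]; simpa using h1)
                          | (rw [show Char.ofNat (48 + 2) = '2' from by decide]; simpa using h2)
                          | (rw [show Char.ofNat (48 + 3) = '3' from by decide]; simpa using h3)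
                          | (rw [show Char.ofNat (48 + 4) = '4' from by decide]; simpa using h4)
                          | (rw [show Char.ofNat (48 + 5) = '5' from by decide]; simpa using h5)
                          | (rw [show Char.ofNat (48 + 6) = '6' from by decide]; simpa using h6)
                          | (rw [show Char.ofNat (48 + 7) = '7' from by decide]; simpa using h7)
                          | (rw [show Char.ofNat (48 + 8) = '8' from by decide]; simpa using h8)
                          | (rw [show Char.ofNat (48 + 9) = '9' from by decide]; simpa using h9)
                      rw [alt_found num 0 (by norm_num)
                          (by rw [show Char.ofNat (48 + 0) = '0' from by decide]; exact h0) hup]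
                      norm_num
                    · rw [if_neg h0]
                      have hall : ∀ k, k ≤ 9 → hasT (Char.ofNat (48 + k)) num.toList = false := by
                        intro k hk
                        interval_cases k <;> first
                          | (rw [show Char.ofNat (48 + 0) = '0' from by decide]; simpa using h0)
                          | (rw [show Char.ofNat (48 + 1) = '1' from by decide]; simpa using h1)
                          | (rw [show Char.ofNat (48 + 2) = '2' from by decide]; simpa using h2)
                          | (rw [show Char.ofNat (48 + 3) = '3' from by decide]; simpa using h3)
                          | (rw [show Char.ofNat (48 + 4) = '4' from by decide]; simpa using h4)
                          | (rw [show Char.ofNat (48 + 5) = '5' from by decide]; simpa using h5)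
                          | (rw [show Char.ofNat (48 + 6) = '6' from by decide]; simpa using h6)
                          | (rw [show Char.ofNat (48 + 7) = '7' from by decide]; simpa using h7)
                          | (rw [show Char.ofNat (48 + 8) = '8' from by decide]; simpa using h8)
                          | (rw [show Char.ofNat (48 + 9) = '9' from by decide]; simpa using h9)
                      rw [alt_none num hall]
                      decide
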